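-- pv_equiv track=rewrite | github.com/CDMY0417/Tool_MATH | function_tools/function_total/0rq67r.py | factor_out_squares
-- ===== SOURCE A (Python) =====
-- def factor_out_squares(product: int):
--     squares = 1
--     non_square = product
--     factor = 2
--     while factor * factor <= non_square:
--         count = 0
--         while non_square % factor == 0:
--             non_square //= factor
--             count += 1
--         if count > 0:
--             squares *= factor ** (count // 2)
--             if count % 2:
--                 non_square *= factor
--         factor += 1
--     if non_square > 1:
--         return squares, non_square
--     return squares, 1
-- ===== SOURCE B (Python) =====
-- def factor_out_squares(product: int):
--     # find the largest d with d*d dividing product; no prime factorization at all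
--     if product < 1:
--         return 1, 1
--     best = 1
--     d = 1
--     while d * d <= product:
--         if product % (d * d) == 0:
--             best = d
--         d += 1
--     return best, product // (best * best)
-- ===== Notes on version B (the rewrite author's own statement) =====
-- stated objective: alternative
-- what changed: B does no prime factorization at all: it scans d = 1..isqrt(n) for divisors with d*d dividing n, keeps the largest such d, and returns (d, n // (d*d)), whereas A trial-divides out each prime and splits its exponent into square and residual parts.
import Mathlib
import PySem

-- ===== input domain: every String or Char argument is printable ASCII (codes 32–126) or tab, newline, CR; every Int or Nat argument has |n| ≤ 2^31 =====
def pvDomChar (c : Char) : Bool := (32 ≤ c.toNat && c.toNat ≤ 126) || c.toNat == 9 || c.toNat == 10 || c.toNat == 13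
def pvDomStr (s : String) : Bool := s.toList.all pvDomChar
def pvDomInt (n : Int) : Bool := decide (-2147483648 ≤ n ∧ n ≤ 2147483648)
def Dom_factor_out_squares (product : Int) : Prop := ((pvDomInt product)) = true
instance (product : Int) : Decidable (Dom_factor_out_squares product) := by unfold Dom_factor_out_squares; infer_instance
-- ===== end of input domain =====

-- B replaces A's prime-by-prime exponent splitting by a direct search for the
-- largest square divisor d*d of the input (alternative algorithm, same cost class).

-- ===== PORT A =====
-- termination measure fact for A's inner loop
theorem pvDivA_dec (ns f : Int) (h : PySem.Int.mod ns f = 0 ∧ 2 ≤ f ∧ 1 ≤ ns) :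
    (PySem.Int.floordiv ns f).toNat < ns.toNat := by
  rw [PySem.Int.floordiv_eq_ediv_of_pos (by omega)]
  have h1 : ns / f < ns := by
    apply Int.ediv_lt_of_lt_mul (by omega)
    have h2 : ns * 2 ≤ ns * f := Int.mul_le_mul_of_nonneg_left h.2.1 (by omega)
    omega
  have h2 : 0 ≤ ns / f := Int.ediv_nonneg (by omega) (by omega)
  omega

-- inner loop of A: 'while non_square % factor == 0: non_square //= factor; count += 1'
-- (the '2 ≤ f ∧ 1 ≤ ns' parts of the guard only make the recursion total; on every state
--  A's outer loop reaches they hold, and when they hold the guard is exactly A's test)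
def pvDivA (ns f c : Int) : Int × Int :=
  if h : PySem.Int.mod ns f = 0 ∧ 2 ≤ f ∧ 1 ≤ ns then
    pvDivA (PySem.Int.floordiv ns f) f (c + 1)
  else (ns, c)
termination_by ns.toNat
decreasing_by exact pvDivA_dec ns f h

-- behaviour of the inner loop, needed for the outer loop's termination (and later for its spec)
theorem pvDivA_spec (ns f c : Int) (hns : 1 ≤ ns) (hf : 2 ≤ f) :
    ∃ k : ℕ, (pvDivA ns f c).2 = c + k ∧ ns = (pvDivA ns f c).1 * f ^ k ∧
      ¬ (f ∣ (pvDivA ns f c).1) ∧ 1 ≤ (pvDivA ns f c).1 := by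
  fun_induction pvDivA ns f c with
  | case1 ns c h ih =>
    have hdvd : f ∣ ns := (PySem.Int.mod_eq_zero_iff_dvd ns f).mp h.1
    have hq : PySem.Int.floordiv ns f = ns / f := PySem.Int.floordiv_eq_ediv_of_pos (by omega)
    have hmul : ns / f * f = ns := Int.ediv_mul_cancel hdvd
    have hq1 : 1 ≤ ns / f := by
      by_contra hc
      push_neg at hc
      nlinarith
    rw [hq] at ih
    rw [hq]
    obtain ⟨k, hk1, hk2, hk3, hk4⟩ := ih hq1
    refine ⟨k + 1, ?_, ?_, hk3, hk4⟩
    · rw [hk1]; push_cast; ring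
    · rw [pow_succ, ← mul_assoc, ← hk2]
      exact hmul.symm
  | case2 ns c h =>
    simp only [not_and] at h
    have hmod : ¬ PySem.Int.mod ns f = 0 := by
      intro hm
      exact absurd hns (by simpa [hf] using h hm)
    refine ⟨0, by simp, by simp, ?_, hns⟩
    exact fun hdvd => hmod ((PySem.Int.mod_eq_zero_iff_dvd ns f).mpr hdvd)

-- termination measure fact for A's outer loop
theorem pvLoopA_dec (ns f : Int) (h : f * f ≤ ns ∧ 2 ≤ f) :
    ((if 0 < (pvDivA ns f 0).2 then
        (if PySem.Int.mod (pvDivA ns f 0).2 2 ≠ 0 then (pvDivA ns f 0).1 * f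
         else (pvDivA ns f 0).1)
      else (pvDivA ns f 0).1) - (f + 1)).toNat < ((ns : Int) - f).toNat := by
  obtain ⟨k, hk1, hk2, hk3, hk4⟩ := pvDivA_spec ns f 0 (by nlinarith [h.1, h.2]) h.2
  have hfk : (f:Int) ^ k ≥ 1 := one_le_pow₀ (by omega)
  have hub : (pvDivA ns f 0).1 * f ≤ ns ∨ k = 0 := by
    rcases Nat.eq_zero_or_pos k with hk0 | hkpos
    · exact Or.inr hk0
    · left
      have : (f:Int) ≤ f ^ k := le_self_pow₀ (by omega) (by omega)
      nlinarith
  have hle : (pvDivA ns f 0).1 ≤ ns := by nlinarith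
  have hf2 : f + 2 ≤ ns := by nlinarith [h.1, h.2]
  rcases hub with hub | hk0
  · split_ifs <;> omega
  · have : (pvDivA ns f 0).2 = 0 := by simp [hk1, hk0]
    split_ifs <;> omega

-- outer loop of A (state: squares, non_square, factor); the '2 ≤ f' conjunct only makes
-- the recursion total — A starts at factor = 2 and only increments it
def pvLoopA (s ns f : Int) : Int × Int :=
  if h : f * f ≤ ns ∧ 2 ≤ f then
    let r := pvDivA ns f 0
    let s' := if 0 < r.2 then s * f ^ (PySem.Int.floordiv r.2 2).toNat else s
    let ns' := if 0 < r.2 then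
        (if PySem.Int.mod r.2 2 ≠ 0 then r.1 * f else r.1)
      else r.1
    pvLoopA s' ns' (f + 1)
  else (s, ns)
termination_by (ns - f).toNat
decreasing_by exact pvLoopA_dec ns f h

def factor_out_squares (product : Int) : Int × Int :=
  let r := pvLoopA 1 product 2
  if 1 < r.2 then (r.1, r.2) else (r.1, 1)

-- ===== PORT B =====
-- termination measure fact for B's scan loop
theorem pvScan_dec (n d : Int) (h : d * d ≤ n ∧ 1 ≤ d) :
    (n + 1 - (d + 1)).toNat < (n + 1 - d).toNat := by
  have : d ≤ n := by nlinarith [h.1, h.2]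
  omega

-- B's loop: 'while d*d <= product: if product % (d*d) == 0: best = d; d += 1'
-- (the '1 ≤ d' conjunct only makes the recursion total; B starts at d = 1 and increments)
def pvScan (n best d : Int) : Int :=
  if h : d * d ≤ n ∧ 1 ≤ d then
    pvScan n (if PySem.Int.mod n (d * d) = 0 then d else best) (d + 1)
  else best
termination_by (n + 1 - d).toNat
decreasing_by exact pvScan_dec n d h

def factor_out_squares_alt (product : Int) : Int × Int :=
  if product < 1 then (1, 1)
  else
    let b := pvScan product 1 1
    (b, PySem.Int.floordiv product (b * b))

-- ===== PRECONDITION & SPEC =====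
def Spec_factor_out_squares (product : Int) (out : Int × Int) : Prop := out = factor_out_squares_alt product
instance (product : Int) (out : Int × Int) : Decidable (Spec_factor_out_squares product out) := by unfold Spec_factor_out_squares; infer_instance

-- ===== CLAIM (what is proved, stated in full; the proofs are below) =====
def Claim_equal_factor_out_squares : Prop := ∀ (product : Int), Dom_factor_out_squares product → Spec_factor_out_squares product (factor_out_squares product)

-- ===== LEMMAS AND PROOFS =====

-- B's scan returns the largest e ≥ 1 with e*e ≤ n and e*e ∣ n
theorem pvScan_spec (n best d : Int) (hb1 : 1 ≤ best) (hbd : best ≤ d)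
    (hd : 1 ≤ d) (hbdvd : best * best ∣ n) :
    1 ≤ pvScan n best d ∧ (pvScan n best d) * (pvScan n best d) ∣ n ∧
    best ≤ pvScan n best d ∧
    (∀ e : Int, d ≤ e → e * e ≤ n → e * e ∣ n → e ≤ pvScan n best d) := by
  fun_induction pvScan n best d with
  | case1 best d h ih =>
    by_cases hm : PySem.Int.mod n (d * d) = 0
    · have hdvd : d * d ∣ n := (PySem.Int.mod_eq_zero_iff_dvd n (d * d)).mp hm
      simp only [if_pos hm, dif_pos hm] at ih ⊢
      obtain ⟨g1, g2, g3, g4⟩ := ih h.2 (by omega) (by omega) hdvd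
      refine ⟨g1, g2, le_trans (le_trans hbd (le_refl d)) g3, ?_⟩
      intro e he1 he2 he3
      rcases eq_or_lt_of_le he1 with he | he
      · exact he ▸ g3
      · exact g4 e (by omega) he2 he3
    · have hndvd : ¬ d * d ∣ n := fun hc =>
        hm ((PySem.Int.mod_eq_zero_iff_dvd n (d * d)).mpr hc)
      simp only [if_neg hm, dif_neg hm] at ih ⊢
      obtain ⟨g1, g2, g3, g4⟩ := ih hb1 (by omega) (by omega) hbdvd
      refine ⟨g1, g2, g3, ?_⟩
      intro e he1 he2 he3
      rcases eq_or_lt_of_le he1 with he | he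
      · exact absurd (he ▸ he3) hndvd
      · exact g4 e (by omega) he2 he3
  | case2 best d h =>
    have hgt : n < d * d := by
      by_contra hc
      push_neg at hc
      exact h ⟨hc, hd⟩
    refine ⟨hb1, hbdvd, le_refl best, ?_⟩
    intro e he1 he2 _
    exfalso
    nlinarith

-- a positive integer with no prime square divisor is squarefree
theorem squarefree_of_no_prime_sq {n : Int} (hn : 1 ≤ n)
    (h : ∀ p : ℕ, p.Prime → ¬ ((p:Int) * p ∣ n)) : Squarefree n := by
  rw [← Int.squarefree_natAbs]
  rw [Nat.squarefree_iff_prime_squarefree]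
  intro p hp hdvd
  refine h p hp ?_
  have : ((p * p : ℕ) : Int) ∣ (n.natAbs : Int) := Int.natCast_dvd_natCast.mpr hdvd
  rw [Int.natAbs_of_nonneg (by omega)] at this
  push_cast at this
  exact this

-- the outer loop of A preserves the decomposition invariant and ends squarefree
theorem pvLoopA_good (s ns f : Int) (hs : 1 ≤ s) (hns : 1 ≤ ns) (hf : 2 ≤ f)
    (hsq : ∀ p : ℕ, p.Prime → (p:Int) < f → ¬ ((p:Int) * p ∣ ns)) :
    1 ≤ (pvLoopA s ns f).1 ∧ 1 ≤ (pvLoopA s ns f).2 ∧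
    (pvLoopA s ns f).1 ^ 2 * (pvLoopA s ns f).2 = s ^ 2 * ns ∧
    Squarefree (pvLoopA s ns f).2 := by
  fun_induction pvLoopA s ns f with
  | case1 s ns f h r s' ns' ih =>
    obtain ⟨k, hk1, hk2, hk3, hk4⟩ := pvDivA_spec ns f 0 hns h.2
    have hr : r = pvDivA ns f 0 := rfl
    rw [← hr] at hk1 hk2 hk3 hk4
    have hf2 : 2 ≤ f := h.2
    have hr2 : r.2 = (k : Int) := by omega
    have hdiv2 : (PySem.Int.floordiv r.2 2).toNat = k / 2 := by
      rw [hr2, show ((2:Int)) = ((2:ℕ):Int) from rfl, PySem.Int.floordiv_natCast]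
      exact Int.toNat_natCast _
    have hmod2 : PySem.Int.mod r.2 2 = ((k % 2 : ℕ) : Int) := by
      rw [hr2, show ((2:Int)) = ((2:ℕ):Int) from rfl, PySem.Int.mod_natCast]
    have hs'eq : s' = s * f ^ (k / 2) := by
      show (if 0 < r.2 then s * f ^ (PySem.Int.floordiv r.2 2).toNat else s) = _
      by_cases hk0 : 0 < r.2
      · rw [if_pos hk0, hdiv2]
      · rw [if_neg hk0]
        have hk00 : k = 0 := by omega
        simp [hk00]
    have hns'eq : ns' = r.1 * f ^ (k % 2) := by
      show (if 0 < r.2 then (if PySem.Int.mod r.2 2 ≠ 0 then r.1 * f else r.1) else r.1) = _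
      by_cases hk0 : 0 < r.2
      · rw [if_pos hk0]
        by_cases hm : k % 2 = 0
        · rw [if_neg (by rw [hmod2]; simp [hm])]
          simp [hm]
        · have hm1 : k % 2 = 1 := by omega
          rw [if_pos (by rw [hmod2]; simp [hm1])]
          rw [hm1, pow_one]
      · have hk00 : k = 0 := by omega
        rw [if_neg hk0]
        simp [hk00]
    have hone : (1:ℤ) ≤ f ^ (k / 2) := one_le_pow₀ (by omega)
    have hone' : (1:ℤ) ≤ f ^ (k % 2) := one_le_pow₀ (by omega)
    have O1 : 1 ≤ s' := by rw [hs'eq]; nlinarith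
    have O2 : 1 ≤ ns' := by rw [hns'eq]; nlinarith
    have O4 : ∀ p : ℕ, p.Prime → (p:Int) < f + 1 → ¬ ((p:Int) * p ∣ ns') := by
      intro p hp hplt hdvd
      rw [hns'eq] at hdvd
      by_cases hcase : (p:Int) < f
      · have hdvd_ns : (r.1 * f ^ (k % 2)) ∣ ns := by
          refine ⟨f ^ (k - k % 2), ?_⟩
          rw [hk2, mul_assoc, ← pow_add]
          congr 2
          omega
        exact hsq p hp hcase (hdvd.trans hdvd_ns)
      · have hpf : (p:Int) = f := by omega
        have hprime : Prime f := hpf ▸ Nat.prime_iff_prime_int.mp hp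
        rw [hpf] at hdvd
        by_cases hm : k % 2 = 0
        · rw [hm, pow_zero, mul_one] at hdvd
          exact hk3 ((dvd_mul_right f f).trans hdvd)
        · have hm1 : k % 2 = 1 := by omega
          rw [hm1, pow_one] at hdvd
          exact hk3 ((mul_dvd_mul_iff_right (by omega : f ≠ 0)).mp hdvd)
    obtain ⟨g1, g2, g3, g4⟩ := ih O1 O2 (by omega) O4
    refine ⟨g1, g2, ?_, g4⟩
    have hfk : ((f : ℤ) ^ (k / 2)) ^ 2 * f ^ (k % 2) = f ^ k := by
      rw [← pow_mul, ← pow_add]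
      congr 1
      omega
    calc (pvLoopA s' ns' (f + 1)).1 ^ 2 * (pvLoopA s' ns' (f + 1)).2 = s' ^ 2 * ns' := g3
      _ = s ^ 2 * ns := by
          rw [hs'eq, hns'eq, hk2,
            show ((s * f ^ (k / 2)) ^ 2 * (r.1 * f ^ (k % 2)) : ℤ)
              = s ^ 2 * ((f ^ (k / 2)) ^ 2 * f ^ (k % 2)) * r.1 from by ring, hfk]
          ring
  | case2 s ns f h =>
    have hlt : ns < f * f := by
      by_contra hc
      push_neg at hc
      exact h ⟨hc, hf⟩
    refine ⟨hs, hns, rfl, ?_⟩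
    apply squarefree_of_no_prime_sq hns
    intro p hp hdvd
    by_cases hcase : (p:Int) < f
    · exact hsq p hp hcase hdvd
    · have hle : (p:Int) * p ≤ ns := Int.le_of_dvd (by omega) hdvd
      nlinarith

-- if d² divides s²·m with m squarefree then d divides s (positive integers)
theorem dvd_of_sq_dvd_sq_mul_squarefree {d s m : Int} (hd : 1 ≤ d) (hs : 1 ≤ s)
    (hm : 1 ≤ m) (hsf : Squarefree m) (h : d * d ∣ s * s * m) : d ∣ s := by
  have ha : d.natAbs * d.natAbs ∣ s.natAbs * s.natAbs * m.natAbs := by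
    have := Int.natAbs_dvd_natAbs.mpr h
    simpa [Int.natAbs_mul] using this
  have hd0 : d.natAbs ≠ 0 := by omega
  have hs0 : s.natAbs ≠ 0 := by omega
  have hm0 : m.natAbs ≠ 0 := by omega
  have hsfN : Squarefree m.natAbs := Int.squarefree_natAbs.mpr hsf
  refine Int.natAbs_dvd_natAbs.mp ?_
  rw [← Nat.factorization_le_iff_dvd hd0 hs0]
  have h1 := (Nat.factorization_le_iff_dvd (Nat.mul_ne_zero hd0 hd0)
      (Nat.mul_ne_zero (Nat.mul_ne_zero hs0 hs0) hm0)).mpr ha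
  intro p
  by_cases hp : p.Prime
  · have h2 := h1 p
    rw [Nat.factorization_mul hd0 hd0,
        Nat.factorization_mul (Nat.mul_ne_zero hs0 hs0) hm0,
        Nat.factorization_mul hs0 hs0] at h2
    simp only [Finsupp.add_apply] at h2
    have h3 : m.natAbs.factorization p ≤ 1 := hsfN.natFactorization_le_one p
    omega
  · rw [Nat.factorization_eq_zero_of_not_prime _ hp]
    omega

-- ===== VERDICT (by name: the statement is the Claim_ definition above) =====
theorem factor_out_squares_spec : Claim_equal_factor_out_squares := by
  intro product _
  unfold Spec_factor_out_squares
  by_cases hneg : product < 1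
  · -- product ≤ 0: both return (1, 1)
    have hA : pvLoopA 1 product 2 = (1, product) := by
      rw [pvLoopA, dif_neg (by rintro ⟨h1, -⟩; omega)]
    show (if 1 < (pvLoopA 1 product 2).2
        then ((pvLoopA 1 product 2).1, (pvLoopA 1 product 2).2)
        else ((pvLoopA 1 product 2).1, 1)) = _
    rw [hA]
    unfold factor_out_squares_alt
    rw [if_pos hneg]
    simp only []
    rw [if_neg (by omega : ¬ (1:Int) < product)]
  · push_neg at hneg
    -- A's result is a good decomposition of product
    obtain ⟨a1, a2, a3, a4⟩ := pvLoopA_good 1 product 2 le_rfl hneg le_rfl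
      (fun p hp hlt => absurd hlt (by have := hp.two_le; omega))
    rw [one_pow, one_mul] at a3
    set s := (pvLoopA 1 product 2).1 with hsdef
    set ns := (pvLoopA 1 product 2).2 with hnsdef
    have hAval : factor_out_squares product = (s, ns) := by
      show (if 1 < ns then (s, ns) else (s, 1)) = _
      by_cases h2 : 1 < ns
      · rw [if_pos h2]
      · rw [if_neg h2]
        have : ns = 1 := by omega
        rw [this]
    have hprod : product = s * s * ns := by rw [← a3]; ring
    have hsdvd : s * s ∣ product := ⟨ns, hprod⟩
    have hssle : s * s ≤ product := by nlinarith
    obtain ⟨b1, b2, b3, b4⟩ := pvScan_spec product 1 1 le_rfl le_rfl le_rfl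
      (by simp)
    set r := pvScan product 1 1 with hrdef
    have hsr : s ≤ r := b4 s a1 hssle hsdvd
    have hrs : r ≤ s := by
      have hdvd : r ∣ s :=
        dvd_of_sq_dvd_sq_mul_squarefree b1 a1 a2 a4 (hprod ▸ b2)
      exact Int.le_of_dvd (by omega) hdvd
    have hreq : r = s := le_antisymm hrs hsr
    have hBval : factor_out_squares_alt product = (r, ns) := by
      unfold factor_out_squares_alt
      rw [if_neg (by omega)]
      simp only [← hrdef]
      congr 1
      rw [hreq, PySem.Int.floordiv_eq_ediv_of_pos (by nlinarith), hprod,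
        Int.mul_ediv_cancel_left _ (by nlinarith : s * s ≠ 0)]
    rw [hAval, hBval, hreq]
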